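-- pv_equiv track=rewrite | github.com/paras-rana11/lis | cloud_bi/database.py | extract_report_data_access_2
-- ===== SOURCE A (Python) =====
-- def extract_report_data_access_2(access_data, mid):
--     lines = access_data.strip().split('\x02')
--     machine_name, patient_name, test_name, test_result = mid, 'N/A', 'N/A', 'N/A'
--     final_list = []
--     for line in lines:
--         # if line.startswith('1H'):
--         #     machine_name = line.split('|')[4]
--         if line.startswith('3O'):
--             patient_name = line.split('|')[2]
--         elif line.startswith('4R'):
--             test_data = line.split('|')
--             test_name = test_data[2].replace('^', '').rstrip('1')
--             test_result = test_data[3].replace('>', '').replace('<', '')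
--     final_list.append((machine_name, patient_name, {test_name: test_result}))
--     return final_list
-- ===== SOURCE B (Python) =====
-- def extract_report_data_access_2(access_data, mid):
--     lines = access_data.strip().split('\x02')
--     o_line = next((l for l in reversed(lines) if l.startswith('3O')), None)
--     r_line = next((l for l in reversed(lines) if l.startswith('4R')), None)
--     patient_name = o_line.split('|')[2] if o_line is not None else 'N/A'
--     if r_line is not None:
--         parts = r_line.split('|')
--         test_name = parts[2].replace('^', '').rstrip('1')
--         test_result = parts[3].replace('>', '').replace('<', '')
--     else:
--         test_name, test_result = 'N/A', 'N/A'
--     return [(mid, patient_name, {test_name: test_result})]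
-- ===== Notes on version B (the rewrite author's own statement) =====
-- stated objective: alternative
-- what changed: Replaces A's single stateful overwrite loop by two independent reversed-scan searches for the last '3O' and last '4R' line, parsing each found line directly.
import Mathlib
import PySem

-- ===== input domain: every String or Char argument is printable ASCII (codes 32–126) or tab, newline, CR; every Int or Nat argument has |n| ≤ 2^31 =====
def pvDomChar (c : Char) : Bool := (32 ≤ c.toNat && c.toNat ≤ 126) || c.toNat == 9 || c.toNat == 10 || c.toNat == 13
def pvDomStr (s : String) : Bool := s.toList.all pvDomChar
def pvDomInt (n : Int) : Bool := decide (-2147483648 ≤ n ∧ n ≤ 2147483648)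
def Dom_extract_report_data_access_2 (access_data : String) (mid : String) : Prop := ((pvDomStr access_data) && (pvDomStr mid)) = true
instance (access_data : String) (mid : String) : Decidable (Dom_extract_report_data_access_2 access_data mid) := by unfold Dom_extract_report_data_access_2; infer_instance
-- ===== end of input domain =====

-- B replaces A's single stateful overwrite loop by two independent reversed-scan
-- searches for the last '3O' and last '4R' lines (objective: alternative decomposition).


-- ===== PORT A =====
-- exact port of s.split(sep) for a non-empty sep (Str.split? is none only for sep = "")
def pvSplit (s sep : String) : List String := (PySem.Str.split? s sep).getD []

-- exact port of Python str.rstrip('1'): drop all trailing '1' characters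
def pvRstrip1 (s : String) : String := String.ofList ((s.toList.reverse.dropWhile (· == '1')).reverse)

-- parse patient_name from a '3O' line:  line.split('|')[2]  (Pre_ guarantees the index exists)
def pvParseO (line : String) : String :=
  (PySem.List.pyGet? (pvSplit line "|") 2).getD ""

-- parse (test_name, test_result) from a '4R' line (Pre_ guarantees the indices exist)
def pvParseR (line : String) : String × String :=
  let td := pvSplit line "|"
  (pvRstrip1 (PySem.Str.replace ((PySem.List.pyGet? td 2).getD "") "^" ""),
   PySem.Str.replace (PySem.Str.replace ((PySem.List.pyGet? td 3).getD "") ">" "") "<" "")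

-- A's loop body: overwrite (patient_name, test_name, test_result)
def pvStepA (s : String × String × String) (line : String) : String × String × String :=
  if PySem.Str.startswith line "3O" then (pvParseO line, s.2.1, s.2.2)
  else if PySem.Str.startswith line "4R" then (s.1, (pvParseR line).1, (pvParseR line).2)
  else s

def extract_report_data_access_2 (access_data : String) (mid : String) : List (String × String × (List (String × String))) :=
  let lines := pvSplit (PySem.Str.strip access_data) "\x02"
  let st := lines.foldl pvStepA ("N/A", "N/A", "N/A")
  [(mid, st.1, [(st.2.1, st.2.2)])]

-- ===== PORT B =====
def extract_report_data_access_2_alt (access_data : String) (mid : String) : List (String × String × (List (String × String))) :=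
  let lines := pvSplit (PySem.Str.strip access_data) "\x02"
  let patient_name :=
    match lines.reverse.find? (fun l => PySem.Str.startswith l "3O") with
    | some l => pvParseO l
    | none => "N/A"
  let tnr :=
    match lines.reverse.find? (fun l => PySem.Str.startswith l "4R") with
    | some l => pvParseR l
    | none => ("N/A", "N/A")
  [(mid, patient_name, [(tnr.1, tnr.2)])]

-- ===== PRECONDITION & SPEC =====
-- Pre_ excludes exactly the inputs on which Python A raises IndexError: a line starting
-- with '3O' having fewer than 3 '|'-fields, or one starting with '4R' having fewer than 4.
def Pre_extract_report_data_access_2 (access_data : String) (mid : String) : Prop :=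
  ∀ l ∈ pvSplit (PySem.Str.strip access_data) "\x02",
    (PySem.Str.startswith l "3O" = true → 3 ≤ (pvSplit l "|").length) ∧
    (PySem.Str.startswith l "4R" = true → 4 ≤ (pvSplit l "|").length)
instance (access_data : String) (mid : String) : Decidable (Pre_extract_report_data_access_2 access_data mid) := by unfold Pre_extract_report_data_access_2; infer_instance

def pvWitness_extract_report_data_access_2 : String × String := ("3O|a|Bob", "M1")

def Spec_extract_report_data_access_2 (access_data : String) (mid : String) (out : List (String × String × (List (String × String)))) : Prop := out = extract_report_data_access_2_alt access_data mid
instance (access_data : String) (mid : String) (out : List (String × String × (List (String × String)))) : Decidable (Spec_extract_report_data_access_2 access_data mid out) := by unfold Spec_extract_report_data_access_2; infer_instance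

-- ===== CLAIM (what is proved, stated in full; the proofs are below) =====
def Claim_equal_extract_report_data_access_2 : Prop := ∀ (access_data : String) (mid : String), Dom_extract_report_data_access_2 access_data mid → Pre_extract_report_data_access_2 access_data mid → Spec_extract_report_data_access_2 access_data mid (extract_report_data_access_2 access_data mid)

-- ===== LEMMAS AND PROOFS =====
-- The loop's final state, characterised by the last matching lines (reverse induction).
theorem pvFoldA_eq (lines : List String) (p tn tr : String) :
    lines.foldl pvStepA (p, tn, tr) =
      ((match lines.reverse.find? (fun l => PySem.Str.startswith l "3O") with
        | some l => pvParseO l | none => p),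
       (match lines.reverse.find? (fun l => PySem.Str.startswith l "4R") with
        | some l => (pvParseR l).1 | none => tn),
       (match lines.reverse.find? (fun l => PySem.Str.startswith l "4R") with
        | some l => (pvParseR l).2 | none => tr)) := by
  induction lines using List.reverseRecOn generalizing p tn tr with
  | nil => rfl
  | append_singleton xs x ih =>
    rw [List.foldl_append, ih, List.foldl_cons, List.foldl_nil, List.reverse_append]
    simp only [List.reverse_singleton, List.singleton_append, List.find?_cons]
    unfold pvStepA
    by_cases h3 : PySem.Chars.startswith x.toList ['3', 'O'] = true
    · have h4 : PySem.Chars.startswith x.toList ['4', 'R'] = false := by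
        rcases (PySem.Chars.startswith_iff _ _).mp h3 with ⟨t, ht⟩
        by_contra hne
        rcases (PySem.Chars.startswith_iff _ _).mp ((Bool.not_eq_false _).mp hne) with ⟨u, hu⟩
        rw [← ht] at hu
        simp at hu
      simp [h3, h4]
    · by_cases h4 : PySem.Chars.startswith x.toList ['4', 'R'] = true
      · simp [h3, h4]
      · simp [h3, h4]

-- ===== VERDICT (by name: the statement is the Claim_ definition above) =====
theorem extract_report_data_access_2_spec : Claim_equal_extract_report_data_access_2 := by
  intro access_data mid _ _
  unfold Spec_extract_report_data_access_2
  unfold extract_report_data_access_2 extract_report_data_access_2_alt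
  simp only [pvFoldA_eq]
  rcases (pvSplit (PySem.Str.strip access_data) "\x02").reverse.find?
      (fun l => PySem.Str.startswith l "3O") with _ | l3 <;>
    rcases (pvSplit (PySem.Str.strip access_data) "\x02").reverse.find?
      (fun l => PySem.Str.startswith l "4R") with _ | l4 <;> rfl
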